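-- pv_equiv track=rewrite | github.com/Chiamie/PhaseGateOne | PythonPhaseGateOne/student_grade_app.py | get_pass_and_fail_count_of_subjects
-- ===== SOURCE A (Python) =====
-- def get_pass_and_fail_count_of_subjects(class_scores):
-- 	performance_count = {}
-- 	pass_count = 0
-- 	fail_count = 0
-- 	for student in class_scores:
-- 		for subject, score in student.items():
-- 			if subject not in ['Total', 'Average', 'Position']:
-- 				if subject not in performance_count:
-- 					performance_count[subject] = {'pass': 0, 'fail': 0}
-- 				if score > 50:
-- 					performance_count[subject]['pass'] += 1
-- 				else:
-- 					performance_count[subject]['fail'] += 1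
-- 	return performance_count
-- ===== SOURCE B (Python) =====
-- def get_pass_and_fail_count_of_subjects(class_scores):
--     excluded = ('Total', 'Average', 'Position')
--     # pass 1: group all scores by subject (excluded subjects never enter the index)
--     scores_by_subject = {}
--     for student in class_scores:
--         for subject, score in student.items():
--             if subject not in excluded:
--                 scores_by_subject.setdefault(subject, []).append(score)
--     # pass 2: turn each score list into pass/fail counts
--     result = {}
--     for subject, scores in scores_by_subject.items():
--         passed = sum(1 for s in scores if s > 50)
--         result[subject] = {'pass': passed, 'fail': len(scores) - passed}
--     return result
-- ===== Notes on version B (the rewrite author's own statement) =====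
-- stated objective: alternative
-- what changed: A counts pass/fail per subject on the fly in one nested loop over a dict-of-dicts counter; B first groups all scores per non-excluded subject into an index dict and then derives each subject's pass/fail counts from its score list in a second pass.
import Mathlib
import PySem

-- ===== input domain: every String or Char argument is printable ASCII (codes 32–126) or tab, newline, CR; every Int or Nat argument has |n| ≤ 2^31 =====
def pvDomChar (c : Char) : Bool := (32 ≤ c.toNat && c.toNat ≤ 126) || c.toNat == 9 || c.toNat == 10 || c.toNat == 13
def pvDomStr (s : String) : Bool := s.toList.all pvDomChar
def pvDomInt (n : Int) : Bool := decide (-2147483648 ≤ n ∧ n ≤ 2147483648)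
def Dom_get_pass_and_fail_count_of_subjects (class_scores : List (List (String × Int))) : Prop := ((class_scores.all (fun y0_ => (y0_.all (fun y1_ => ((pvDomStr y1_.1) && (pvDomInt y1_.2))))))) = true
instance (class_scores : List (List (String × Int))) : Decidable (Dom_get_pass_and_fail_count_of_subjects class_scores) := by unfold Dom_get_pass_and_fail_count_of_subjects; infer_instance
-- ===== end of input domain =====

-- B replaces A's one-pass dict-of-dicts counter by a two-pass decomposition (group scores per
-- subject, then derive pass/fail counts from each group); objective: alternative decomposition
-- of similar cost, proved to return the identical dict.

-- ===== PORT A =====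
-- the loop body of A's nested for (named so the proofs can speak about it)
def pvStepA (perf : PySem.Dict String (PySem.Dict String Int)) (sp : String × Int) :
    PySem.Dict String (PySem.Dict String Int) :=
  if sp.1 ∉ ["Total", "Average", "Position"] then
    let perf := if perf.contains sp.1 then perf
                else perf.insert sp.1 (PySem.Dict.ofList [("pass", (0 : Int)), ("fail", (0 : Int))])
    if sp.2 > 50 then
      perf.insert sp.1 ((perf.getD sp.1 PySem.Dict.empty).insert "pass"
        ((perf.getD sp.1 PySem.Dict.empty).getD "pass" 0 + 1))
    else
      perf.insert sp.1 ((perf.getD sp.1 PySem.Dict.empty).insert "fail"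
        ((perf.getD sp.1 PySem.Dict.empty).getD "fail" 0 + 1))
  else perf

def get_pass_and_fail_count_of_subjects (class_scores : List (List (String × Int))) :
    List (String × List (String × Int)) :=
  let performance_count : PySem.Dict String (PySem.Dict String Int) :=
    class_scores.foldl
      (fun perf student => ((PySem.Dict.ofList student).items).foldl pvStepA perf)
      PySem.Dict.empty
  performance_count.items.map (fun p => (p.1, p.2.items))

-- ===== PORT B =====
-- passed = sum(1 for s in scores if s > 50)
def pvPassCnt (scores : List Int) : Int :=
  scores.foldl (fun a s => if s > 50 then a + 1 else a) 0

-- scores_by_subject.setdefault(subject, []).append(score)  (net effect on the dict)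
def pvStepB (d : PySem.Dict String (List Int)) (sp : String × Int) :
    PySem.Dict String (List Int) :=
  if sp.1 ∉ ["Total", "Average", "Position"] then
    d.insert sp.1 (d.getD sp.1 [] ++ [sp.2])
  else d

def get_pass_and_fail_count_of_subjects_alt (class_scores : List (List (String × Int))) :
    List (String × List (String × Int)) :=
  let scores_by_subject : PySem.Dict String (List Int) :=
    class_scores.foldl
      (fun d student => ((PySem.Dict.ofList student).items).foldl pvStepB d)
      PySem.Dict.empty
  scores_by_subject.items.map (fun p =>
    (p.1, [("pass", pvPassCnt p.2), ("fail", (p.2.length : Int) - pvPassCnt p.2)]))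

-- ===== PRECONDITION & SPEC =====
def Spec_get_pass_and_fail_count_of_subjects (class_scores : List (List (String × Int))) (out : List (String × List (String × Int))) : Prop := out = get_pass_and_fail_count_of_subjects_alt class_scores
instance (class_scores : List (List (String × Int))) (out : List (String × List (String × Int))) : Decidable (Spec_get_pass_and_fail_count_of_subjects class_scores out) := by unfold Spec_get_pass_and_fail_count_of_subjects; infer_instance

-- ===== CLAIM (what is proved, stated in full; the proofs are below) =====
def Claim_equal_get_pass_and_fail_count_of_subjects : Prop := ∀ (class_scores : List (List (String × Int))), Dom_get_pass_and_fail_count_of_subjects class_scores → Spec_get_pass_and_fail_count_of_subjects class_scores (get_pass_and_fail_count_of_subjects class_scores)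

-- ===== LEMMAS AND PROOFS =====

-- A's counter dict for a list of scores
def pvCDict (l : List Int) : PySem.Dict String Int :=
  PySem.Dict.mk [("pass", pvPassCnt l), ("fail", (l.length : Int) - pvPassCnt l)]

-- the invariant linking A's dict to B's index
def pvR (dA : PySem.Dict String (PySem.Dict String Int)) (dB : PySem.Dict String (List Int)) : Prop :=
  dA.items = dB.items.map (fun p => (p.1, pvCDict p.2)) ∧ dB.keys.Nodup

lemma pvPassCnt_snoc (l : List Int) (s : Int) :
    pvPassCnt (l ++ [s]) = if s > 50 then pvPassCnt l + 1 else pvPassCnt l := by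
  simp [pvPassCnt, List.foldl_append]
lemma pvCDict_pass (l : List Int) (s : Int) (h : s > 50) :
    (pvCDict l).insert "pass" ((pvCDict l).getD "pass" 0 + 1) = pvCDict (l ++ [s]) := by
  apply PySem.Dict.ext
  simp [pvCDict, PySem.Dict.items_insert, PySem.Dict.getD_eq_get?_getD,
    PySem.Dict.get?_mk_cons, pvPassCnt_snoc, h]
lemma pvCDict_fail (l : List Int) (s : Int) (h : ¬ s > 50) :
    (pvCDict l).insert "fail" ((pvCDict l).getD "fail" 0 + 1) = pvCDict (l ++ [s]) := by
  apply PySem.Dict.ext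
  simp [pvCDict, PySem.Dict.items_insert, PySem.Dict.getD_eq_get?_getD,
    PySem.Dict.get?_mk_cons, pvPassCnt_snoc, h]
  omega

lemma pvR_step (dA : PySem.Dict String (PySem.Dict String Int)) (dB : PySem.Dict String (List Int))
    (sp : String × Int) (h : pvR dA dB) : pvR (pvStepA dA sp) (pvStepB dB sp) := by
  obtain ⟨hI, hN⟩ := h
  by_cases hex : sp.1 ∈ ["Total", "Average", "Position"]
  · simpa [pvStepA, pvStepB, hex] using And.intro hI hN
  · have hkeys : dA.keys = dB.keys := by
      simp only [PySem.Dict.keys, hI, List.map_map]; rfl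
    have hcont : dA.contains sp.1 = dB.contains sp.1 := by
      simp [PySem.Dict.contains_eq_decide_mem_keys, hkeys]
    have hNA : dA.keys.Nodup := by rw [hkeys]; exact hN
    by_cases hc : dB.contains sp.1 = true
    · -- existing key
      have hAc : dA.contains sp.1 = true := by rw [hcont]; exact hc
      have hmem : sp.1 ∈ dB.keys := by
        rw [← PySem.Dict.contains_iff_mem_keys]; exact hc
      obtain ⟨v2, hv2⟩ : ∃ x, (sp.1, x) ∈ dB.items := by simpa [PySem.Dict.keys] using hmem
      set q : String × List Int := (sp.1, v2) with hqdef
      have hq : q ∈ dB.items := hv2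
      have hq1 : q.1 = sp.1 := rfl
      -- q ∈ dB.items, q.1 = sp.1
      have hgB : dB.getD sp.1 [] = q.2 := by
        rw [← hq1]; exact PySem.Dict.getD_of_mem_items _ hq hN _
      have hqA : (sp.1, pvCDict q.2) ∈ dA.items := by
        rw [hI]; exact List.mem_map.mpr ⟨q, hq, by rw [hq1]⟩
      have hgA : dA.getD sp.1 PySem.Dict.empty = pvCDict q.2 :=
        PySem.Dict.getD_of_mem_items _ hqA hNA _
      have hmain : ∀ v : Int, pvR (dA.insert sp.1
            ((dA.getD sp.1 PySem.Dict.empty).insert (if v > 50 then "pass" else "fail")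
              ((dA.getD sp.1 PySem.Dict.empty).getD (if v > 50 then "pass" else "fail") 0 + 1)))
          (dB.insert sp.1 (dB.getD sp.1 [] ++ [v])) := by
        intro v
        constructor
        · rw [PySem.Dict.items_insert_of_contains _ _ hAc,
            PySem.Dict.items_insert_of_contains _ _ hc, hI, List.map_map, List.map_map]
          apply List.map_congr_left
          intro p hp
          by_cases hpk : p.1 = sp.1
          · have hps : p.2 = q.2 := by
              have h1 : dB.get? p.1 = some p.2 := PySem.Dict.get?_of_mem_items _ hp hN
              have h2 : dB.get? p.1 = some q.2 := by
                rw [hpk, ← hq1]; exact PySem.Dict.get?_of_mem_items _ hq hN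
              exact Option.some.inj (h1.symm.trans h2)
            simp [Function.comp, hpk, hgA, hgB]
            by_cases hv : v > 50
            · simp [hv]; exact pvCDict_pass q.2 v hv
            · simp [hv]; exact pvCDict_fail q.2 v hv
          · simp [Function.comp, hpk]
        · exact PySem.Dict.nodup_keys_insert _ _ _ hN
      by_cases hv : sp.2 > 50
      · simpa [pvStepA, pvStepB, hex, hAc, hv] using hmain sp.2
      · simpa [pvStepA, pvStepB, hex, hAc, hv] using hmain sp.2
    · -- fresh key
      have hAc : dA.contains sp.1 = false := by
        rw [hcont]; exact Bool.not_eq_true _ ▸ (by simpa using hc)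
      have hcB : dB.contains sp.1 = false := by simpa using hc
      have hgB : dB.getD sp.1 [] = [] := PySem.Dict.getD_of_not_contains _ _ hcB
      have hmain : pvR (pvStepA dA sp) (pvStepB dB sp) := by
        constructor
        · have hini : (PySem.Dict.ofList [("pass", (0 : Int)), ("fail", (0 : Int))] :
              PySem.Dict String Int) = pvCDict [] := by decide
          have hsA : pvStepA dA sp = dA.insert sp.1 (pvCDict [sp.2]) := by
            simp only [pvStepA, if_pos hex, hAc, Bool.false_eq_true, if_false, hini,
              PySem.Dict.getD_insert_self, PySem.Dict.insert_insert_self]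
            by_cases hv : sp.2 > 50
            · rw [if_pos hv, pvCDict_pass [] sp.2 hv]; rfl
            · rw [if_neg hv, pvCDict_fail [] sp.2 hv]; rfl
          rw [hsA, PySem.Dict.items_insert_of_not_contains _ _ hAc]
          simp [pvStepB, hex, PySem.Dict.items_insert_of_not_contains _ _ hcB, hI, hgB]
        · simp only [pvStepB, if_pos hex]
          exact PySem.Dict.nodup_keys_insert _ _ _ hN
      exact hmain

lemma pvR_foldl_inner (items : List (String × Int)) :
    ∀ dA dB, pvR dA dB → pvR (items.foldl pvStepA dA) (items.foldl pvStepB dB) := by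
  induction items with
  | nil => intro dA dB h; exact h
  | cons sp rest ih => intro dA dB h; exact ih _ _ (pvR_step dA dB sp h)

lemma pvR_foldl_outer (cs : List (List (String × Int))) :
    ∀ dA dB, pvR dA dB →
      pvR (cs.foldl (fun perf student => ((PySem.Dict.ofList student).items).foldl pvStepA perf) dA)
          (cs.foldl (fun d student => ((PySem.Dict.ofList student).items).foldl pvStepB d) dB) := by
  induction cs with
  | nil => intro dA dB h; exact h
  | cons st rest ih => intro dA dB h; exact ih _ _ (pvR_foldl_inner _ dA dB h)

-- ===== VERDICT (by name: the statement is the Claim_ definition above) =====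
theorem get_pass_and_fail_count_of_subjects_spec : Claim_equal_get_pass_and_fail_count_of_subjects := by
  intro cs _
  unfold Spec_get_pass_and_fail_count_of_subjects
  unfold get_pass_and_fail_count_of_subjects get_pass_and_fail_count_of_subjects_alt
  obtain ⟨hitems, -⟩ := pvR_foldl_outer cs PySem.Dict.empty PySem.Dict.empty
    ⟨rfl, by simp [PySem.Dict.keys_empty]⟩
  simp only [hitems, List.map_map]
  rfl
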